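-- pv_equiv track=rewrite | github.com/ValentinKlinger/prologin | qualification_2024/un_peu_d_ordre.py | ordre
-- ===== SOURCE A (Python) =====
-- def ordre(k: int, n: int, tailles: list[int]):
--     """
--     :param k: le nombre magique
--     :param n: le nombre de personnes
--     :param tailles: la liste des tailles de chaque personne
--
--
--     >>> ordre(1, 5, [5, 4, 3, 2, 1])
--     'OUI'
--     >>> ordre(2, 5, [5, 4, 3, 2, 1])
--     'OUI'
--     >>> ordre(3, 5, [5, 4, 3, 2, 1])
--     'NON'
--     >>> ordre(3, 5, [4, 5, 3, 1, 2])
--     'OUI'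
--     >>> ordre(2, 6, [1, 3, 5, 2, 4, 2])
--     'NON'
--     >>> ordre(2, 6, [1, 3, 4, 2, 2, 5])
--     'OUI'
--     >>> ordre(4, 4, [1, 2, 2, 4])
--     'OUI'
--     """
--     ordre_final = sorted(tailles)
--
--     positions_initiales = {}
--     for idx_personne in range(len(tailles)):
--         if tailles[idx_personne] in positions_initiales:
--             positions_initiales[tailles[idx_personne]].append(idx_personne)
--         else:
--             positions_initiales[tailles[idx_personne]] = [idx_personne]
--
--     for rang_personne in range(len(ordre_final)):
--         for position_possible in range(
--             len(positions_initiales[ordre_final[rang_personne]])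
--         ):
--             if (
--                 (
--                     rang_personne
--                     - positions_initiales[ordre_final[rang_personne]][position_possible]
--                 )
--                 / k
--             ).is_integer():
--                 positions_initiales[ordre_final[rang_personne]].pop(position_possible)
--                 break
--         else:
--             return "NON"
--     return "OUI"
-- ===== SOURCE B (Python) =====
-- def ordre(k: int, n: int, tailles: list[int]):
--     # Count (value, rank % k) over the sorted order, then consume one count
--     # per (value, position % k) over the initial order; sortable iff the
--     # two residue multisets match, since same-residue slots are interchangeable.
--     cnt = {}
--     for rang, taille in enumerate(sorted(tailles)):
--         key = (taille, rang % k)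
--         cnt[key] = cnt.get(key, 0) + 1
--     for pos, taille in enumerate(tailles):
--         key = (taille, pos % k)
--         c = cnt.get(key, 0)
--         if c == 0:
--             return "NON"
--         cnt[key] = c - 1
--     return "OUI"
-- ===== Notes on version B (the rewrite author's own statement) =====
-- stated objective: alternative
-- what changed: Replaces A's per-rank scan-and-pop over per-value position lists by a counter of (value, index mod k) keys built from the sorted order and consumed over the initial order, valid because same-residue slots are interchangeable.
-- outside the precondition, e.g. on ordre(0, 2, [2, 1]): A raises ZeroDivisionError, B raises ZeroDivisionError
import Mathlib
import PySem

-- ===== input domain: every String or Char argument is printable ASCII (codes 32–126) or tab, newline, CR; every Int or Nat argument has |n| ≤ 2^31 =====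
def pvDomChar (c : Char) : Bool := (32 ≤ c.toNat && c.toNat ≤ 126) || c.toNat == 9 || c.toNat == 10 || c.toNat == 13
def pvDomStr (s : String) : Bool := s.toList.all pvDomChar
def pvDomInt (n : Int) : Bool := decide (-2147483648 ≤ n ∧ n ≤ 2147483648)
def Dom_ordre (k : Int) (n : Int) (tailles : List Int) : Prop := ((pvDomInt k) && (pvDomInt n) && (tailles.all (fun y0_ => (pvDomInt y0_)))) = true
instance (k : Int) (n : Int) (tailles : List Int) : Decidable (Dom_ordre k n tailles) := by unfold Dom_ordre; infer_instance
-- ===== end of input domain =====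

-- B replaces A's scan-and-pop over per-value position lists by a counter of
-- (value, index mod k) keys; equal on all inputs with k ≠ 0 (k = 0 makes both
-- Pythons raise ZeroDivisionError).

-- ===== PORT A =====
-- inner 'for position_possible … break/else' of A: scan the list left to right and
-- pop the first p with ((rang - p) / k).is_integer(); on the admitted inputs the
-- float test is exactly divisibility, ported as (rang - p) % k == 0.
def ordreFindPop (k : Int) (rang : Int) : List Int → Option (List Int)
  | [] => none
  | p :: rest =>
    if PySem.Int.mod (rang - p) k == 0 then some rest
    else (ordreFindPop k rang rest).map (fun l => p :: l)

-- the 'positions_initiales' dict: value ↦ list of initial indices, built by the first loop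
def ordreBuildPos (tailles : List Int) : PySem.Dict Int (List Int) :=
  (PySem.List.enumerate tailles).foldl
    (fun d iv =>
      match d.get? iv.2 with
      | some l => d.insert iv.2 (l ++ [iv.1])
      | none => d.insert iv.2 [iv.1])
    PySem.Dict.empty

-- the outer 'for rang_personne' loop over the sorted order
def ordreLoopA (k : Int) : List (Int × Int) → PySem.Dict Int (List Int) → String
  | [], _ => "OUI"
  | rv :: rest, d =>
    match ordreFindPop k rv.1 (d.getD rv.2 []) with
    | none => "NON"
    | some l => ordreLoopA k rest (d.insert rv.2 l)

def ordre (k : Int) (n : Int) (tailles : List Int) : String :=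
  ordreLoopA k (PySem.List.enumerate (PySem.List.sorted tailles (fun x => x)))
    (ordreBuildPos tailles)

-- ===== PORT B =====
-- first loop of Source B: count the keys (taille, rang % k) over the sorted order
def ordreBuildCnt (k : Int) (tailles : List Int) : PySem.Dict (Int × Int) Int :=
  (PySem.List.enumerate (PySem.List.sorted tailles (fun x => x))).foldl
    (fun d rv =>
      let key := (rv.2, PySem.Int.mod rv.1 k)
      d.insert key (d.getD key 0 + 1))
    PySem.Dict.empty

-- second loop of Source B: consume one count per (taille, pos % k)
def ordreLoopB (k : Int) : List (Int × Int) → PySem.Dict (Int × Int) Int → String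
  | [], _ => "OUI"
  | pv :: rest, d =>
    let key := (pv.2, PySem.Int.mod pv.1 k)
    let c := d.getD key 0
    if c == 0 then "NON"
    else ordreLoopB k rest (d.insert key (c - 1))

def ordre_alt (k : Int) (n : Int) (tailles : List Int) : String :=
  ordreLoopB k (PySem.List.enumerate tailles) (ordreBuildCnt k tailles)

-- ===== PRECONDITION & SPEC =====
-- k = 0 is excluded: both Pythons raise ZeroDivisionError there (A in '/ k', B in '% k').
def Pre_ordre (k : Int) (n : Int) (tailles : List Int) : Prop := k ≠ 0
instance (k : Int) (n : Int) (tailles : List Int) : Decidable (Pre_ordre k n tailles) := by unfold Pre_ordre; infer_instance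
def pvWitness_ordre : Int × Int × List Int := (2, 5, [5, 4, 3, 2, 1])

def Spec_ordre (k : Int) (n : Int) (tailles : List Int) (out : String) : Prop := out = ordre_alt k n tailles
instance (k : Int) (n : Int) (tailles : List Int) (out : String) : Decidable (Spec_ordre k n tailles out) := by unfold Spec_ordre; infer_instance

-- ===== CLAIM (what is proved, stated in full; the proofs are below) =====
def Claim_equal_ordre : Prop := ∀ (k : Int) (n : Int) (tailles : List Int), Dom_ordre k n tailles → Pre_ordre k n tailles → Spec_ordre k n tailles (ordre k n tailles)

-- ===== LEMMAS AND PROOFS =====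

-- the key (value, residue of the index mod k) of an enumerated entry
def keyOf (k : Int) (rv : Int × Int) : Int × Int := (rv.2, PySem.Int.mod rv.1 k)

-- count of a key among the enumerated entries of a list
def mcount (k : Int) (L : List (Int × Int)) (key : Int × Int) : Nat :=
  (L.map (keyOf k)).count key

-- count of positions with a given residue in one of A's dict lists
def pcnt (k : Int) (c : Int) (l : List Int) : Nat :=
  l.countP (fun p => PySem.Int.mod p k == c)

theorem pymod_eq_iff (k r p : Int) (hk : k ≠ 0) :
    PySem.Int.mod r k = PySem.Int.mod p k ↔ k ∣ (r - p) := by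
  have hr := PySem.Int.floordiv_mul_add_mod r k
  have hp := PySem.Int.floordiv_mul_add_mod p k
  constructor
  · intro h
    exact ⟨PySem.Int.floordiv r k - PySem.Int.floordiv p k, by linear_combination hp - hr + h⟩
  · rintro ⟨m, hm⟩
    have ht : PySem.Int.mod r k - PySem.Int.mod p k
        = k * (m - PySem.Int.floordiv r k + PySem.Int.floordiv p k) := by
      linear_combination hm + hr - hp
    have habs : |PySem.Int.mod r k - PySem.Int.mod p k| < |k| := by
      rcases lt_or_gt_of_ne hk with hneg | hpos
      · have b1 := PySem.Int.mod_neg_bounds r hneg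
        have b2 := PySem.Int.mod_neg_bounds p hneg
        rw [abs_lt]; constructor <;> [skip; skip] <;> rw [abs_of_neg hneg] <;> omega
      · have b1 := PySem.Int.mod_nonneg r hpos
        have b2 := PySem.Int.mod_lt r hpos
        have b3 := PySem.Int.mod_nonneg p hpos
        have b4 := PySem.Int.mod_lt p hpos
        rw [abs_lt]; constructor <;> rw [abs_of_pos hpos] <;> omega
    rw [ht, abs_mul] at habs
    have hk' : 0 < |k| := abs_pos.mpr hk
    have : |m - PySem.Int.floordiv r k + PySem.Int.floordiv p k| < 1 := by
      by_contra hge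
      push Not at hge
      nlinarith
    have hz : m - PySem.Int.floordiv r k + PySem.Int.floordiv p k = 0 := by
      have := abs_lt.mp this; omega
    rw [hz, mul_zero] at ht
    omega

theorem findPop_none_iff (k r : Int) (xs : List Int) :
    ordreFindPop k r xs = none ↔ ∀ p ∈ xs, ¬ (PySem.Int.mod (r - p) k = 0) := by
  induction xs with
  | nil => simp [ordreFindPop]
  | cons p rest ih =>
    simp only [ordreFindPop]
    by_cases h : PySem.Int.mod (r - p) k = 0
    · simp [h]
    · simp [h, ih]

theorem findPop_some_perm (k r : Int) (xs : List Int) :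
    ∀ l, ordreFindPop k r xs = some l →
    ∃ p, PySem.Int.mod (r - p) k = 0 ∧ xs.Perm (p :: l) := by
  induction xs with
  | nil => intro l h; simp [ordreFindPop] at h
  | cons q rest ih =>
    intro l h
    simp only [ordreFindPop] at h
    by_cases hq : PySem.Int.mod (r - q) k = 0
    · simp [hq] at h
      exact ⟨q, hq, by rw [h]⟩
    · simp [hq] at h
      obtain ⟨l', hl', rfl⟩ := h
      obtain ⟨p, hp, hperm⟩ := ih l' hl'
      exact ⟨p, hp, ((hperm.cons q).trans (List.Perm.swap p q l'))⟩

theorem mcount_cons (k : Int) (rv : Int × Int) (rest : List (Int × Int)) (key : Int × Int) :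
    mcount k (rv :: rest) key = mcount k rest key + (if keyOf k rv = key then 1 else 0) := by
  simp [mcount, List.count_cons]

theorem loopA_oui_iff (k : Int) (hk : k ≠ 0) (L : List (Int × Int)) :
    ∀ d : PySem.Dict Int (List Int),
    ordreLoopA k L d = "OUI" ↔
      ∀ key : Int × Int, mcount k L key ≤ pcnt k key.2 (d.getD key.1 []) := by
  induction L with
  | nil => intro d; simp [ordreLoopA, mcount]
  | cons rv rest ih =>
    intro d
    obtain ⟨r, v⟩ := rv
    simp only [ordreLoopA]
    cases h : ordreFindPop k r (d.getD v []) with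
    | none =>
      simp only []
      constructor
      · intro hx; exact absurd hx (by decide)
      · intro H; exfalso
        have h0 := (findPop_none_iff k r _).mp h
        have hp0 : pcnt k (PySem.Int.mod r k) (d.getD v []) = 0 := by
          rw [pcnt, List.countP_eq_zero]
          intro p hp
          simp only [beq_iff_eq]
          intro hc
          exact h0 p hp ((PySem.Int.mod_eq_zero_iff_dvd _ _).mpr
            ((pymod_eq_iff k r p hk).mp hc.symm))
        have H0 := H (v, PySem.Int.mod r k)
        rw [mcount_cons] at H0
        simp [keyOf, hp0] at H0
    | some l =>
      rw [ih]
      obtain ⟨p, hpmod, hperm⟩ := findPop_some_perm k r _ l h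
      have hmodp : PySem.Int.mod p k = PySem.Int.mod r k :=
        ((pymod_eq_iff k r p hk).mpr ((PySem.Int.mod_eq_zero_iff_dvd _ _).mp hpmod)).symm
      have E2 : ∀ key : Int × Int, pcnt k key.2 (d.getD key.1 []) =
          pcnt k key.2 ((d.insert v l).getD key.1 []) +
            (if keyOf k (r, v) = key then 1 else 0) := by
        rintro ⟨kv, kc⟩
        show pcnt k kc (d.getD kv []) =
          pcnt k kc ((d.insert v l).getD kv []) + (if keyOf k (r, v) = (kv, kc) then 1 else 0)
        by_cases hv : kv = v
        · subst hv
          rw [PySem.Dict.getD_insert_self]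
          have hcp := hperm.countP_eq (fun q => PySem.Int.mod q k == kc)
          simp only [pcnt]
          rw [hcp, List.countP_cons]
          simp only [keyOf, Prod.mk.injEq, hmodp, beq_iff_eq]
          by_cases hc2 : PySem.Int.mod r k = kc
          · simp [hc2]
          · simp [hc2]
        · rw [PySem.Dict.getD_insert_of_ne d l [] hv]
          simp only [keyOf, Prod.mk.injEq]
          have : ¬ (v = kv ∧ PySem.Int.mod r k = kc) := by
            rintro ⟨h1, -⟩; exact hv h1.symm
          simp [this]
      constructor <;> intro H key <;>
        have h1 := E2 key <;> have h2 := mcount_cons k (r, v) rest key <;>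
        have H0 := H key <;>
        [by_cases hkey : keyOf k (r, v) = key; by_cases hkey : keyOf k (r, v) = key] <;>
        first
          | (rw [if_pos hkey] at h1 h2; omega)
          | (rw [if_neg hkey] at h1 h2; omega)

theorem loopB_oui_iff (k : Int) (L : List (Int × Int)) :
    ∀ d : PySem.Dict (Int × Int) Int, (∀ key, 0 ≤ d.getD key 0) →
    (ordreLoopB k L d = "OUI" ↔
      ∀ key : Int × Int, (mcount k L key : Int) ≤ d.getD key 0) := by
  induction L with
  | nil =>
    intro d hd
    simp only [ordreLoopB, mcount, List.map_nil, List.count_nil]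
    constructor
    · intro _ key; exact_mod_cast hd key
    · intro _; trivial
  | cons pv rest ih =>
    intro d hd
    obtain ⟨i, v⟩ := pv
    simp only [ordreLoopB]
    by_cases h0 : d.getD (v, PySem.Int.mod i k) 0 = 0
    · rw [if_pos (by simpa using h0)]
      constructor
      · intro hx; exact absurd hx (by decide)
      · intro H; exfalso
        have H0 := H (v, PySem.Int.mod i k)
        rw [mcount_cons] at H0
        simp [keyOf, h0] at H0
        omega
    · rw [if_neg (by simpa using h0)]
      have hd' : ∀ key, 0 ≤ (d.insert (v, PySem.Int.mod i k)
          (d.getD (v, PySem.Int.mod i k) 0 - 1)).getD key 0 := by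
        intro key
        by_cases hkey : key = (v, PySem.Int.mod i k)
        · subst hkey
          rw [PySem.Dict.getD_insert_self]
          have := hd (v, PySem.Int.mod i k); omega
        · rw [PySem.Dict.getD_insert_of_ne d _ _ hkey]
          exact hd key
      rw [ih _ hd']
      constructor <;> intro H key <;> have H0 := H key <;>
        have h2 := mcount_cons k (i, v) rest key <;>
        by_cases hkey : keyOf k (i, v) = key
      · have hkey' : key = (v, PySem.Int.mod i k) := by rw [← hkey]; rfl
        subst hkey'
        rw [if_pos hkey] at h2
        rw [PySem.Dict.getD_insert_self] at H0
        omega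
      · rw [if_neg hkey] at h2
        rw [PySem.Dict.getD_insert_of_ne d _ _ (fun h => hkey (by rw [h]; rfl))] at H0
        omega
      · have hkey' : key = (v, PySem.Int.mod i k) := by rw [← hkey]; rfl
        subst hkey'
        rw [if_pos hkey] at h2
        rw [PySem.Dict.getD_insert_self]
        omega
      · rw [if_neg hkey] at h2
        rw [PySem.Dict.getD_insert_of_ne d _ _ (fun h => hkey (by rw [h]; rfl))]
        omega

theorem buildCnt_getD (k : Int) (ts : List Int) (key : Int × Int) :
    (ordreBuildCnt k ts).getD key 0 =
      (mcount k (PySem.List.enumerate (PySem.List.sorted ts (fun x => x))) key : Int) := by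
  unfold ordreBuildCnt
  rw [show (fun (d : PySem.Dict (Int × Int) Int) (rv : Int × Int) =>
        let key := (rv.2, PySem.Int.mod rv.1 k); d.insert key (d.getD key 0 + 1))
      = (fun (d : PySem.Dict (Int × Int) Int) rv =>
          d.insert (keyOf k rv) (d.getD (keyOf k rv) 0 + 1)) from rfl]
  rw [← List.foldl_map (f := keyOf k)
    (g := fun (d : PySem.Dict (Int × Int) Int) x => d.insert x (d.getD x 0 + 1))]
  rw [PySem.Dict.getD_foldl_insert_add_one]
  simp [mcount]

theorem buildPos_getD (ts : List Int) (v : Int) :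
    (ordreBuildPos ts).getD v [] =
      ((PySem.List.enumerate ts).filter (fun rv => rv.2 == v)).map (·.1) := by
  unfold ordreBuildPos
  have hstep : (fun (d : PySem.Dict Int (List Int)) (iv : Int × Int) =>
        match d.get? iv.2 with
        | some l => d.insert iv.2 (l ++ [iv.1])
        | none => d.insert iv.2 [iv.1])
      = (fun (d : PySem.Dict Int (List Int)) (iv : Int × Int) =>
          d.modify iv.2 [] (· ++ [iv.1])) := by
    funext d iv
    cases hg : d.get? iv.2 with
    | none =>
      simp only []
      rw [show d.modify iv.2 [] (· ++ [iv.1]) = d.insert iv.2 ((d.getD iv.2 []) ++ [iv.1]) from rfl,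
        PySem.Dict.getD_of_get?_eq_none d _ hg]
      rfl
    | some l =>
      simp only []
      rw [show d.modify iv.2 [] (· ++ [iv.1]) = d.insert iv.2 ((d.getD iv.2 []) ++ [iv.1]) from rfl,
        PySem.Dict.getD_of_get?_eq_some d _ hg]
  rw [hstep]
  have hfold : List.foldl (fun (d : PySem.Dict Int (List Int)) (p : Int × Int) =>
        d.modify p.1 [] (· ++ [p.2])) PySem.Dict.empty ((PySem.List.enumerate ts).map Prod.swap)
      = List.foldl (fun (d : PySem.Dict Int (List Int)) (iv : Int × Int) =>
          d.modify iv.2 [] (· ++ [iv.1])) PySem.Dict.empty (PySem.List.enumerate ts) :=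
    List.foldl_map
  rw [← hfold]
  rw [PySem.Dict.getD_foldl_modify_append]
  rw [List.filter_map, List.map_map]
  rfl

theorem pcnt_buildPos (k : Int) (ts : List Int) (key : Int × Int) :
    pcnt k key.2 ((ordreBuildPos ts).getD key.1 []) =
      mcount k (PySem.List.enumerate ts) key := by
  obtain ⟨kv, kc⟩ := key
  show pcnt k kc ((ordreBuildPos ts).getD kv []) = mcount k (PySem.List.enumerate ts) (kv, kc)
  rw [buildPos_getD]
  rw [pcnt, List.countP_map, List.countP_filter]
  rw [mcount, List.count_eq_countP, List.countP_map]
  apply List.countP_congr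
  intro rv _
  obtain ⟨i, v⟩ := rv
  by_cases h1 : PySem.Int.mod i k = kc <;> by_cases h2 : v = kv <;>
    simp [keyOf, h1, h2, Function.comp]

theorem loopA_cases (k : Int) (L : List (Int × Int)) :
    ∀ d, ordreLoopA k L d = "OUI" ∨ ordreLoopA k L d = "NON" := by
  induction L with
  | nil => intro d; left; rfl
  | cons rv rest ih =>
    intro d
    simp only [ordreLoopA]
    cases ordreFindPop k rv.1 (d.getD rv.2 []) with
    | none => right; rfl
    | some l => exact ih _

theorem loopB_cases (k : Int) (L : List (Int × Int)) :
    ∀ d, ordreLoopB k L d = "OUI" ∨ ordreLoopB k L d = "NON" := by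
  induction L with
  | nil => intro d; left; rfl
  | cons pv rest ih =>
    intro d
    simp only [ordreLoopB]
    by_cases h : d.getD (pv.2, PySem.Int.mod pv.1 k) 0 == 0
    · rw [if_pos h]; right; rfl
    · rw [if_neg h]; exact ih _

theorem ordre_oui_iff (k n : Int) (ts : List Int) (hk : k ≠ 0) :
    ordre k n ts = "OUI" ↔
      ∀ key, mcount k (PySem.List.enumerate (PySem.List.sorted ts (fun x => x))) key ≤
        mcount k (PySem.List.enumerate ts) key := by
  unfold ordre
  rw [loopA_oui_iff k hk _ (ordreBuildPos ts)]
  constructor <;> intro H key <;> have H0 := H key <;>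
    have h1 := pcnt_buildPos k ts key <;> omega

theorem ordre_alt_oui_iff (k n : Int) (ts : List Int) :
    ordre_alt k n ts = "OUI" ↔
      ∀ key, mcount k (PySem.List.enumerate ts) key ≤
        mcount k (PySem.List.enumerate (PySem.List.sorted ts (fun x => x))) key := by
  unfold ordre_alt
  rw [loopB_oui_iff k _ (ordreBuildCnt k ts)
    (fun key => by rw [buildCnt_getD]; exact Int.natCast_nonneg _)]
  constructor <;> intro H key <;> have H0 := H key <;>
    have h1 := buildCnt_getD k ts key <;> omega

theorem cond_swap (k : Int) (ts : List Int) :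
    (∀ key, mcount k (PySem.List.enumerate (PySem.List.sorted ts (fun x => x))) key ≤
        mcount k (PySem.List.enumerate ts) key) ↔
    (∀ key, mcount k (PySem.List.enumerate ts) key ≤
        mcount k (PySem.List.enumerate (PySem.List.sorted ts (fun x => x))) key) := by
  have hlen : ((PySem.List.enumerate (PySem.List.sorted ts (fun x => x))).map (keyOf k)).length
      = ((PySem.List.enumerate ts).map (keyOf k)).length := by
    simp [PySem.List.length_enumerate, PySem.List.length_sorted]
  constructor <;> intro H
  · have hsub : ((PySem.List.enumerate (PySem.List.sorted ts (fun x => x))).map (keyOf k)).Subperm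
        ((PySem.List.enumerate ts).map (keyOf k)) :=
      List.subperm_ext_iff.mpr (fun x _ => H x)
    have hperm := hsub.perm_of_length_le (le_of_eq hlen.symm)
    intro key
    rw [mcount, mcount, hperm.count_eq]
  · have hsub : ((PySem.List.enumerate ts).map (keyOf k)).Subperm
        ((PySem.List.enumerate (PySem.List.sorted ts (fun x => x))).map (keyOf k)) :=
      List.subperm_ext_iff.mpr (fun x _ => H x)
    have hperm := hsub.perm_of_length_le (le_of_eq hlen)
    intro key
    rw [mcount, mcount, hperm.count_eq]

-- ===== VERDICT (by name: the statement is the Claim_ definition above) =====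
theorem ordre_spec : Claim_equal_ordre := by
  intro k n ts _ hk
  unfold Spec_ordre
  rcases loopA_cases k (PySem.List.enumerate (PySem.List.sorted ts (fun x => x))) (ordreBuildPos ts) with hA | hA <;>
  rcases loopB_cases k (PySem.List.enumerate ts) (ordreBuildCnt k ts) with hB | hB
  · show ordre k n ts = ordre_alt k n ts
    rw [show ordre k n ts = _ from hA, show ordre_alt k n ts = _ from hB]
  · exfalso
    have hcond := (ordre_oui_iff k n ts hk).mp hA
    have := (ordre_alt_oui_iff k n ts).mpr ((cond_swap k ts).mp hcond)
    rw [show ordre_alt k n ts = _ from hB] at this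
    exact absurd this (by decide)
  · exfalso
    have hcond := (ordre_alt_oui_iff k n ts).mp hB
    have := (ordre_oui_iff k n ts hk).mpr ((cond_swap k ts).mpr hcond)
    rw [show ordre k n ts = _ from hA] at this
    exact absurd this (by decide)
  · show ordre k n ts = ordre_alt k n ts
    rw [show ordre k n ts = _ from hA, show ordre_alt k n ts = _ from hB]
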